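-- pv_equiv track=rewrite | github.com/ikeralvis/gasolineras_project | recomendacion-service/app/services/routing.py | _read_polyline_component
-- ===== SOURCE A (Python) =====
-- def _read_polyline_component(polyline: str, index: int) -> tuple[int, int]:
--     result = 0
--     shift = 0
--
--     while index < len(polyline):
--         value = ord(polyline[index]) - 63
--         index += 1
--         result |= (value & 0x1F) << shift
--         shift += 5
--         if value < 0x20:
--             delta = ~(result >> 1) if (result & 1) else (result >> 1)
--             return delta, index
--
--     raise ValueError("polyline-incompleta")
-- ===== SOURCE B (Python) =====
-- def _read_polyline_component(polyline: str, index: int) -> tuple[int, int]: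
--     # Pass 1: collect the 5-bit groups of this component and the index after it.
--     groups = []
--     n = len(polyline)
--     i = index
--     new_index = None
--     while i < n:
--         value = ord(polyline[i]) - 63
--         i += 1
--         groups.append(value & 0x1F)
--         if value < 0x20:
--             new_index = i
--             break
--     if new_index is None:
--         raise ValueError("polyline-incompleta")
--     # Pass 2: fold the groups into the raw value.
--     result = 0
--     for k, g in enumerate(groups):
--         result |= g << (5 * k)
--     delta = ~(result >> 1) if (result & 1) else (result >> 1)
--     return delta, new_index
-- ===== Notes on version B (the rewrite author's own statement) =====
-- stated objective: alternative
-- what changed: A's single while-loop that ORs each shifted 5-bit group into the accumulator as it scans is split into two passes: a first scan that collects the low-5-bit groups of the component (and the index after its terminator), then a separate enumerate-fold that ORs group << (5*k) into the result, followed by the zigzag decode.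
import Mathlib
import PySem

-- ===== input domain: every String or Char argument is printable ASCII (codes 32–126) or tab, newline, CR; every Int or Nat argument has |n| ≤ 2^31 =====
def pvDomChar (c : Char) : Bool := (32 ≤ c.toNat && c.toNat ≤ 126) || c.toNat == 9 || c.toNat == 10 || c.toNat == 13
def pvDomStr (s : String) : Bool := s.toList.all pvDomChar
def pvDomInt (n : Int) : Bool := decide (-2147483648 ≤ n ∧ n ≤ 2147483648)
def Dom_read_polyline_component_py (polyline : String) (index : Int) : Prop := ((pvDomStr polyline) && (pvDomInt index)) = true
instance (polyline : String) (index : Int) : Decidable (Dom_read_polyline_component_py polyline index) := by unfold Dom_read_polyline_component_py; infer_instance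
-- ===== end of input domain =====

-- B splits A's single accumulating loop into two passes (collect the 5-bit groups, then fold
-- them with explicit shifts); same return value wherever A returns (objective: alternative).

-- ===== PORT A =====
-- A's while-loop; state (result, shift, index); none = the loop raised (IndexError on a
-- wrapped-out-of-range negative index, or ValueError on falling off the end).
def pvALoop (cs : List Char) (index : Int) (result : Int) (shift : Nat) : Option (Int × Int) :=
  if _h : index < (cs.length : Int) then
    match PySem.List.pyGet? cs index with
    | none => none  -- IndexError
    | some c =>
      let value : Int := (c.toNat : Int) - 63
      let result' := PySem.Int.bor result ((PySem.Int.band value 0x1F) <<< shift)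
      if value < 0x20 then
        some (if PySem.Int.band result' 1 ≠ 0 then Int.not (result' >>> 1) else result' >>> 1,
              index + 1)
      else pvALoop cs (index + 1) result' (shift + 5)
  else none  -- ValueError "polyline-incompleta"
termination_by (cs.length - index).toNat
decreasing_by omega

def read_polyline_component_py (polyline : String) (index : Int) : Int × Int :=
  (pvALoop polyline.toList index 0 0).getD (0, 0)  -- none excluded by Pre_

-- ===== PORT B =====
-- B's first pass: the list of 5-bit groups of this component and the index after it;
-- none = the corresponding exception (excluded by Pre_).
def pvCollect (cs : List Char) (i : Int) : Option (List Int × Int) :=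
  if _h : i < (cs.length : Int) then
    match PySem.List.pyGet? cs i with
    | none => none
    | some c =>
      let value : Int := (c.toNat : Int) - 63
      let g := PySem.Int.band value 0x1F
      if value < 0x20 then some ([g], i + 1)
      else
        match pvCollect cs (i + 1) with
        | none => none
        | some (gs, ni) => some (g :: gs, ni)
  else none
termination_by (cs.length - i).toNat
decreasing_by omega

-- B's second pass: result |= g << (5*k) over enumerate(groups).
def pvCombine (gs : List Int) : Int :=
  (gs.zipIdx).foldl (fun (r : Int) (p : Int × Nat) => PySem.Int.bor r (p.1 <<< (5 * p.2))) 0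

def read_polyline_component_py_alt (polyline : String) (index : Int) : Int × Int :=
  match pvCollect polyline.toList index with
  | none => (0, 0)
  | some (gs, ni) =>
    let result := pvCombine gs
    (if PySem.Int.band result 1 ≠ 0 then Int.not (result >>> 1) else result >>> 1, ni)

-- ===== PRECONDITION & SPEC =====
-- Pre_ excludes exactly the inputs on which A raises: index below -len (IndexError via
-- Python's negative indexing) or no character with code < 95 (value < 0x20) at or after
-- index (ValueError "polyline-incompleta"); B raises the same exceptions there.
def Pre_read_polyline_component_py (polyline : String) (index : Int) : Prop :=
  -(polyline.toList.length : Int) ≤ index ∧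
  ((PySem.List.pyRange index (polyline.toList.length : Int) 1).any
    (fun j => decide ((PySem.List.pyGetD polyline.toList j 'a').toNat < 95))) = true
instance (polyline : String) (index : Int) : Decidable (Pre_read_polyline_component_py polyline index) := by
  unfold Pre_read_polyline_component_py; infer_instance

def pvWitness_read_polyline_component_py : String × Int := ("?", 0)

def Spec_read_polyline_component_py (polyline : String) (index : Int) (out : Int × Int) : Prop := out = read_polyline_component_py_alt polyline index
instance (polyline : String) (index : Int) (out : Int × Int) : Decidable (Spec_read_polyline_component_py polyline index out) := by unfold Spec_read_polyline_component_py; infer_instance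

-- ===== CLAIM (what is proved, stated in full; the proofs are below) =====
def Claim_equal_read_polyline_component_py : Prop := ∀ (polyline : String) (index : Int), Dom_read_polyline_component_py polyline index → Pre_read_polyline_component_py polyline index → Spec_read_polyline_component_py polyline index (read_polyline_component_py polyline index)

-- ===== LEMMAS AND PROOFS =====

-- A's fold of the groups, with explicit accumulator and shift.
def pvFoldWith (r : Int) (s : Nat) : List Int → Int
  | [] => r
  | g :: gs => pvFoldWith (PySem.Int.bor r (g <<< s)) (s + 5) gs

def pvZig (r : Int) : Int :=
  if PySem.Int.band r 1 ≠ 0 then Int.not (r >>> 1) else r >>> 1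

-- A's loop equals "collect, then fold with the running accumulator/shift, then zigzag".
theorem pvALoop_eq_collect_aux (cs : List Char) (n : Nat) :
    ∀ (i r : Int) (s : Nat), (((cs.length : Int) - i).toNat ≤ n) →
      pvALoop cs i r s = (pvCollect cs i).map (fun p => (pvZig (pvFoldWith r s p.1), p.2)) := by
  induction n with
  | zero =>
    intro i r s hn
    rw [pvALoop, pvCollect]
    have h : ¬ i < (cs.length : Int) := by omega
    simp [h]
  | succ n ih =>
    intro i r s hn
    rw [pvALoop, pvCollect]
    by_cases h : i < (cs.length : Int)
    · simp only [dif_pos h]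
      cases hget : PySem.List.pyGet? cs i with
      | none => simp
      | some c =>
        by_cases hv : ((c.toNat : Int) - 63) < 32
        · simp [hv, pvZig, pvFoldWith]
        · have hih := ih (i + 1)
            (PySem.Int.bor r (PySem.Int.band ((c.toNat : Int) - 63) 31 <<< s)) (s + 5) (by omega)
          simp only [if_neg hv, hih]
          cases pvCollect cs (i + 1) with
          | none => rfl
          | some p => cases p; simp [pvFoldWith]
    · simp [h]

theorem pvALoop_eq_collect (cs : List Char) (i r : Int) (s : Nat) :
    pvALoop cs i r s = (pvCollect cs i).map (fun p => (pvZig (pvFoldWith r s p.1), p.2)) :=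
  pvALoop_eq_collect_aux cs (((cs.length : Int) - i).toNat) i r s (le_refl _)

theorem pvCombine_aux (gs : List Int) (r : Int) (k : Nat) :
    ((gs.zipIdx k).foldl (fun (r : Int) (p : Int × Nat) => PySem.Int.bor r (p.1 <<< (5 * p.2))) r)
      = pvFoldWith r (5 * k) gs := by
  induction gs generalizing r k with
  | nil => rfl
  | cons g gs ih =>
    simp only [List.zipIdx, List.foldl_cons, pvFoldWith]
    rw [ih]
    congr 1

theorem pvCombine_eq (gs : List Int) : pvCombine gs = pvFoldWith 0 0 gs := by
  simpa using pvCombine_aux gs 0 0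

-- ===== VERDICT (by name: the statement is the Claim_ definition above) =====
theorem read_polyline_component_py_spec : Claim_equal_read_polyline_component_py := by
  intro polyline index _hdom _hpre
  unfold Spec_read_polyline_component_py read_polyline_component_py read_polyline_component_py_alt
  rw [pvALoop_eq_collect]
  cases h : pvCollect polyline.toList index with
  | none => rfl
  | some p =>
    cases p
    simp [pvCombine_eq, pvZig]
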